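-- pv_equiv track=rewrite | github.com/rbroderi/synsort | src/synsort/config.py | _normalize_order
-- ===== SOURCE A (Python) =====
-- DEFAULT_ORDER: list[str] = ["globals", "dunder", "public", "private"]
--
-- def _normalize_order(order: list[str] | None) -> list[str]:
--     cleaned: list[str] = []
--     if order:
--         for raw in order:
--             item = raw.strip().lower()
--             if item in DEFAULT_ORDER and item not in cleaned:
--                 cleaned.append(item)
--     for fallback in DEFAULT_ORDER:
--         if fallback not in cleaned:
--             cleaned.append(fallback)
--     return cleaned
-- ===== SOURCE B (Python) =====
-- DEFAULT_ORDER: list[str] = ["globals", "dunder", "public", "private"]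
--
-- def _normalize_order(order):
--     rank: dict[str, int] = {}
--     for raw in order or []:
--         item = raw.strip().lower()
--         if item in DEFAULT_ORDER:
--             rank.setdefault(item, len(rank))
--     return sorted(DEFAULT_ORDER, key=lambda x: rank.get(x, len(DEFAULT_ORDER)))
-- ===== Notes on version B (the rewrite author's own statement) =====
-- stated objective: alternative
-- what changed: Replaces the two explicit filter-and-append loops by building a first-occurrence rank dict in one pass and returning a stable sort of DEFAULT_ORDER keyed by rank with a past-the-end sentinel for absent items.
import Mathlib
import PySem

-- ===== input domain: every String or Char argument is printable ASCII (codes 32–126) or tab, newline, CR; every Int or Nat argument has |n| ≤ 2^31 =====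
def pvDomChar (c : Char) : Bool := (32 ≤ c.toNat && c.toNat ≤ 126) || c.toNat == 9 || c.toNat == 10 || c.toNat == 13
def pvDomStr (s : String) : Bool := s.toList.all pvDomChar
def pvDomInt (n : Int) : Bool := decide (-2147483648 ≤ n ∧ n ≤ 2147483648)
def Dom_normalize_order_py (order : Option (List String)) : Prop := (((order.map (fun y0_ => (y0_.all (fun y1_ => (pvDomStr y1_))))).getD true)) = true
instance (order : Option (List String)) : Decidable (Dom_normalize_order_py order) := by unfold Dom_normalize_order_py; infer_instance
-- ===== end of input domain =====

-- B replaces A's two filtering loops by a one-pass first-occurrence rank dict plus a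
-- stable keyed sort of DEFAULT_ORDER (objective: alternative decomposition, same cost).

-- ===== PORT A =====
def pvDefaultOrder : List String := ["globals", "dunder", "public", "private"]

def pvAStep (cleaned : List String) (raw : String) : List String :=
  let item := PySem.Str.lower (PySem.Str.strip raw)
  if item ∈ pvDefaultOrder ∧ item ∉ cleaned then cleaned ++ [item] else cleaned

def normalize_order_py (order : Option (List String)) : List String :=
  let cleaned : List String :=
    match order with
    | none => []
    | some xs => if xs = [] then [] else xs.foldl pvAStep []
  pvDefaultOrder.foldl (fun c fallback => if fallback ∉ c then c ++ [fallback] else c) cleaned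

-- ===== PORT B =====
def pvBStep (rank : PySem.Dict String Int) (raw : String) : PySem.Dict String Int :=
  let item := PySem.Str.lower (PySem.Str.strip raw)
  if item ∈ pvDefaultOrder then rank.setdefault item (rank.size : Int) else rank

def normalize_order_py_alt (order : Option (List String)) : List String :=
  let rank : PySem.Dict String Int := (order.getD []).foldl pvBStep PySem.Dict.empty
  PySem.List.sorted pvDefaultOrder (fun x => rank.getD x (PySem.List.len pvDefaultOrder)) false

-- ===== PRECONDITION & SPEC =====
def Spec_normalize_order_py (order : Option (List String)) (out : List String) : Prop := out = normalize_order_py_alt order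
instance (order : Option (List String)) (out : List String) : Decidable (Spec_normalize_order_py order out) := by unfold Spec_normalize_order_py; infer_instance

-- ===== CLAIM (what is proved, stated in full; the proofs are below) =====
def Claim_equal_normalize_order_py : Prop := ∀ (order : Option (List String)), Dom_normalize_order_py order → Spec_normalize_order_py order (normalize_order_py order)

-- ===== LEMMAS AND PROOFS =====

-- the reachable states of A's `cleaned` list: duplicate-free sequences over pvDefaultOrder
def pvGrow (S : List (List String)) : List (List String) :=
  S ++ S.flatMap (fun c => (pvDefaultOrder.filter (fun x => x ∉ c)).map (fun x => c ++ [x]))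

def pvStates : List (List String) := pvGrow (pvGrow (pvGrow (pvGrow [[]])))

-- B's rank dict corresponding to A's cleaned list
def pvRank (c : List String) : PySem.Dict String Int :=
  PySem.Dict.mk ((c.zipIdx).map (fun p => (p.1, (p.2 : Int))))

set_option maxRecDepth 10000 in
lemma pvStates_closed : ∀ c ∈ pvStates, ∀ item ∈ pvDefaultOrder,
    (if item ∈ pvDefaultOrder ∧ item ∉ c then c ++ [item] else c) ∈ pvStates := by decide

set_option maxRecDepth 10000 in
lemma pvStep_sim : ∀ c ∈ pvStates, ∀ item ∈ pvDefaultOrder,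
    (if item ∈ pvDefaultOrder then (pvRank c).setdefault item ((pvRank c).size : Int) else pvRank c)
      = pvRank (if item ∈ pvDefaultOrder ∧ item ∉ c then c ++ [item] else c) := by decide

lemma pvAStep_states (c : List String) (hc : c ∈ pvStates) (raw : String) :
    pvAStep c raw ∈ pvStates := by
  unfold pvAStep
  by_cases h : PySem.Str.lower (PySem.Str.strip raw) ∈ pvDefaultOrder
  · exact pvStates_closed c hc _ h
  · simp only [h, false_and, if_false]; exact hc

lemma pvBStep_sim (c : List String) (hc : c ∈ pvStates) (raw : String) :
    pvBStep (pvRank c) raw = pvRank (pvAStep c raw) := by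
  unfold pvBStep pvAStep
  by_cases h : PySem.Str.lower (PySem.Str.strip raw) ∈ pvDefaultOrder
  · exact pvStep_sim c hc _ h
  · simp only [h, false_and, if_false]

lemma pvLoop (xs : List String) (c : List String) (hc : c ∈ pvStates) :
    xs.foldl pvBStep (pvRank c) = pvRank (xs.foldl pvAStep c)
      ∧ xs.foldl pvAStep c ∈ pvStates := by
  induction xs generalizing c with
  | nil => exact ⟨rfl, hc⟩
  | cons raw rest ih =>
    simp only [List.foldl_cons, pvBStep_sim c hc raw]
    exact ih (pvAStep c raw) (pvAStep_states c hc raw)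

set_option maxRecDepth 10000 in
lemma pvFinal : ∀ c ∈ pvStates,
    PySem.List.sorted pvDefaultOrder (fun x => (pvRank c).getD x (PySem.List.len pvDefaultOrder)) false
      = pvDefaultOrder.foldl (fun c fallback => if fallback ∉ c then c ++ [fallback] else c) c := by decide

lemma pvEmptyRank : (PySem.Dict.empty : PySem.Dict String Int) = pvRank [] := rfl

lemma pvNilStates : ([] : List String) ∈ pvStates := by decide

lemma pvIfFold (xs : List String) :
    (if xs = [] then ([] : List String) else xs.foldl pvAStep []) = xs.foldl pvAStep [] := by
  cases xs <;> simp

-- ===== VERDICT (by name: the statement is the Claim_ definition above) =====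
theorem normalize_order_py_spec : Claim_equal_normalize_order_py := by
  intro order _
  unfold Spec_normalize_order_py normalize_order_py normalize_order_py_alt
  cases order with
  | none =>
    simp only [Option.getD, List.foldl_nil, pvEmptyRank]
    exact (pvFinal [] pvNilStates).symm
  | some xs =>
    simp only [Option.getD, pvIfFold, pvEmptyRank]
    obtain ⟨h1, h2⟩ := pvLoop xs [] pvNilStates
    rw [h1]
    exact (pvFinal _ h2).symm
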